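-- pv_equiv track=rewrite | github.com/kolyasalubov/UA-12-10-23.PythonFundamentals | LitvischenkoYevhen/HW7.2/HW72_task_3.py | filter_words_perversion
-- ===== SOURCE A (Python) =====
-- def filter_words_perversion(str):
--     """
--     Capitalized string and remove unneedible space
--     withaut using string function
--     """
--     alphabet_upper = ['A', 'B', 'C', 'D', 'E', 'F', 'G', 'H', 'I', 'J', 'K', 'L', 'M', 'N', 'O', 'P', 'Q', 'R', 'S', 'T', 'U', 'V', 'W', 'X', 'Y', 'Z']
--     #alphabet_lower = list(''.join(alphabet_upper).lower())
--     alphabet_lower = ['a', 'b', 'c', 'd', 'e', 'f', 'g', 'h', 'i', 'j', 'k', 'l', 'm', 'n', 'o', 'p', 'q', 'r', 's', 't', 'u', 'v', 'w', 'x', 'y', 'z']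
--     #convert string to list
--     list_of_char = list(str)
--     #Delite spaces
--     while list_of_char[0] == ' ' :
--         list_of_char.pop(0)
--
--     while list_of_char[-1] == ' ' :
--         list_of_char.pop(-1)
--     i = 0
--     while i < len(list_of_char) :
--         if list_of_char[i] == ' ' and list_of_char[i-1] == ' ':
--             list_of_char.pop(i)
--         else:
--             i += 1
--
--
--     #Capitalized list
--     for i in range(len(list_of_char)) :
--         if i == 0:
--             if list_of_char[i] in alphabet_lower:
--                 list_of_char[i] = alphabet_upper[alphabet_lower.index(list_of_char[i])]
--         elif list_of_char[i] in alphabet_upper: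
--             list_of_char[i] = alphabet_lower[alphabet_upper.index(list_of_char[i])]
--
--     #concatinate string from list
--     result_str = ''
--     for i in list_of_char :
--         result_str += i
--     return result_str
-- ===== SOURCE B (Python) =====
-- # One forward pass with an accumulator (no in-place pops/index juggling); ASCII-explicit case helpers.
-- def _to_upper(c):
--     return chr(ord(c) - 32) if 'a' <= c <= 'z' else c
--
-- def _to_lower(c):
--     return chr(ord(c) + 32) if 'A' <= c <= 'Z' else c
--
-- def filter_words_perversion(str):
--     out = []
--     for ch in str:
--         if ch == ' ':
--             if out and out[-1] != ' ':
--                 out.append(' ')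
--         else:
--             out.append(ch)
--     if out and out[-1] == ' ':
--         out.pop()
--     res = [_to_upper(out[0])]
--     for ch in out[1:]:
--         res.append(_to_lower(ch))
--     return ''.join(res)
-- ===== Notes on version B (the rewrite author's own statement) =====
-- stated objective: faster
-- what changed: A's three in-place pop/index while-loops (strip left, strip right, collapse by index-pop) plus 26-letter alphabet-table lookups are replaced by a single forward pass with an accumulator that never emits a space after a space, one trailing-space pop, and arithmetic ASCII case changes.
-- outside the precondition, e.g. on filter_words_perversion('   '): A raises IndexError, B raises IndexError
import Mathlib
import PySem

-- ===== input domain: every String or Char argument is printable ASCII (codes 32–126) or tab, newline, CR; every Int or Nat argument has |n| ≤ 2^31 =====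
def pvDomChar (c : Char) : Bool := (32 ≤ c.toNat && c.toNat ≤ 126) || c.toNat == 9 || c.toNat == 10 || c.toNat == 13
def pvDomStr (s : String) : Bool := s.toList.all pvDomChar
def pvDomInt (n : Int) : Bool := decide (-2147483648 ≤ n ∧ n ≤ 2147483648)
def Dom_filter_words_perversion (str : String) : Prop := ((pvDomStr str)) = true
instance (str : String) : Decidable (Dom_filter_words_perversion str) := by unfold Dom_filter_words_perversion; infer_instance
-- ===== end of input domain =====

-- B replaces A's three in-place pop/index while-loops by one forward pass with an accumulator (measurably faster; no quadratic pops).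

-- ===== PORT A =====
def pvAlphaUpper : List Char := ['A','B','C','D','E','F','G','H','I','J','K','L','M','N','O','P','Q','R','S','T','U','V','W','X','Y','Z']
def pvAlphaLower : List Char := ['a','b','c','d','e','f','g','h','i','j','k','l','m','n','o','p','q','r','s','t','u','v','w','x','y','z']

-- while list_of_char[0] == ' ': list_of_char.pop(0)   (Python raises IndexError on []; excluded by Pre_)
def pvStripLeft : List Char → List Char
  | [] => []
  | c :: r => if c = ' ' then pvStripLeft r else c :: r

-- while list_of_char[-1] == ' ': list_of_char.pop(-1)
def pvStripRight (l : List Char) : List Char :=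
  if h : l.getLast? = some ' ' then pvStripRight l.dropLast else l
termination_by l.length
decreasing_by
  have hne : l ≠ [] := by intro e; subst e; simp at h
  have : 0 < l.length := List.length_pos_iff.mpr hne
  simp [List.length_dropLast]; omega

-- i = 0; while i < len(l): if l[i] == ' ' and l[i-1] == ' ': l.pop(i) else: i += 1
def pvCollapse (l : List Char) (i : Nat) : List Char :=
  if hi : i < l.length then
    if PySem.List.pyGet? l (i : Int) = some ' ' ∧ PySem.List.pyGet? l ((i : Int) - 1) = some ' '
    then pvCollapse (l.eraseIdx i) i
    else pvCollapse l (i + 1)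
  else l
termination_by l.length - i
decreasing_by
  · rw [List.length_eraseIdx_of_lt hi]; omega
  · omega

-- if c in alphabet_lower: c = alphabet_upper[alphabet_lower.index(c)]
def pvTblUp (c : Char) : Char :=
  if c ∈ pvAlphaLower then
    match PySem.List.index? pvAlphaLower c with
    | some j => (PySem.List.pyGet? pvAlphaUpper (j : Int)).getD c
    | none => c
  else c

-- elif c in alphabet_upper: c = alphabet_lower[alphabet_upper.index(c)]
def pvTblLo (c : Char) : Char :=
  if c ∈ pvAlphaUpper then
    match PySem.List.index? pvAlphaUpper c with
    | some j => (PySem.List.pyGet? pvAlphaLower (j : Int)).getD c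
    | none => c
  else c

-- for i in range(len(l)): l[i] = …  (each slot written once from its own old value — index-wise map)
def pvCapStep (i : Nat) (c : Char) : Char := if i = 0 then pvTblUp c else pvTblLo c

def filter_words_perversion (str : String) : String :=
  String.mk
    (((pvCollapse (pvStripRight (pvStripLeft str.toList)) 0).mapIdx pvCapStep).foldl
      (fun acc ch => acc ++ [ch]) [])

-- ===== PORT B =====
def pvToUpper (c : Char) : Char := if 'a' ≤ c ∧ c ≤ 'z' then Char.ofNat (c.toNat - 32) else c
def pvToLower (c : Char) : Char := if 'A' ≤ c ∧ c ≤ 'Z' then Char.ofNat (c.toNat + 32) else c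

-- loop body: space appended only after a non-space, other chars always appended
def pvBStep (out : List Char) (ch : Char) : List Char :=
  if ch = ' ' then
    if out ≠ [] ∧ out.getLast? ≠ some ' ' then out ++ [' '] else out
  else out ++ [ch]

-- if out and out[-1] == ' ': out.pop()
def pvBFinish (out : List Char) : List Char :=
  if out ≠ [] ∧ out.getLast? = some ' ' then out.dropLast else out

def filter_words_perversion_alt (str : String) : String :=
  match pvBFinish (str.toList.foldl pvBStep []) with
  | [] => ""   -- Source B raises IndexError (out[0]) here; excluded by Pre_
  | c :: rest => String.mk (pvToUpper c :: rest.map pvToLower)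

-- ===== PRECONDITION & SPEC =====
-- Pre_ excludes exactly the strings with no non-space character (empty or all spaces), on which A raises IndexError.
def Pre_filter_words_perversion (str : String) : Prop := (str.toList.any (fun c => c != ' ')) = true
instance (str : String) : Decidable (Pre_filter_words_perversion str) := by unfold Pre_filter_words_perversion; infer_instance
def pvWitness_filter_words_perversion : String := "  hello   WORLD  "

def Spec_filter_words_perversion (str : String) (out : String) : Prop := out = filter_words_perversion_alt str
instance (str : String) (out : String) : Decidable (Spec_filter_words_perversion str out) := by unfold Spec_filter_words_perversion; infer_instance

-- ===== CLAIM (what is proved, stated in full; the proofs are below) =====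
def Claim_equal_filter_words_perversion : Prop := ∀ (str : String), Dom_filter_words_perversion str → Pre_filter_words_perversion str → Spec_filter_words_perversion str (filter_words_perversion str)

-- ===== LEMMAS AND PROOFS =====

-- canonical middle form: collapse runs of spaces, tracking the previous kept character
def pvDed (prev : Char) : List Char → List Char
  | [] => []
  | c :: r => if c = ' ' ∧ prev = ' ' then pvDed prev r else c :: pvDed c r

def pvRstrip (t : List Char) : List Char := (t.reverse.dropWhile (fun x => x == ' ')).reverse

lemma pvStripLeft_eq (l : List Char) : pvStripLeft l = l.dropWhile (fun x => x == ' ') := by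
  induction l with
  | nil => rfl
  | cons c r ih =>
      by_cases h : c = ' ' <;> simp [pvStripLeft, List.dropWhile_cons, h, ih]

lemma pvStripRight_eq (l : List Char) : pvStripRight l = pvRstrip l := by
  rw [pvStripRight]
  split
  · rename_i h
    have hne : l ≠ [] := by intro e; subst e; simp at h
    have hg : l.getLast hne = ' ' := by
      have := List.getLast?_eq_getLast (l := l) hne
      rw [this] at h
      exact Option.some.inj h
    have hl : l.dropLast ++ [' '] = l := by
      rw [← hg]; exact List.dropLast_append_getLast hne
    rw [pvStripRight_eq l.dropLast]
    conv_rhs => rw [← hl]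
    simp [pvRstrip, List.reverse_append]
  · rename_i h
    rcases l.eq_nil_or_concat with rfl | ⟨u, d, rfl⟩
    · rfl
    · simp only [List.concat_eq_append] at *
      have hd : d ≠ ' ' := by intro e; subst e; simp at h
      simp [pvRstrip, List.dropWhile_cons, hd]
termination_by l.length
decreasing_by
  have : 0 < l.length := List.length_pos_iff.mpr hne
  simp only [List.length_dropLast]
  omega

lemma pvCollapse_inv (b : List Char) : ∀ (a : List Char) (prev : Char), a ≠ [] →
    a.getLast? = some prev → pvCollapse (a ++ b) a.length = a ++ pvDed prev b := by
  induction b with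
  | nil =>
      intro a prev ha hp
      rw [pvCollapse]
      simp [pvDed]
  | cons c b' ih =>
      intro a prev ha hp
      rw [pvCollapse]
      have hlen : a.length < (a ++ c :: b').length := by simp
      rw [dif_pos hlen]
      obtain ⟨k, hk⟩ : ∃ k, a.length = k + 1 := by
        cases a with
        | nil => exact absurd rfl ha
        | cons x xs => exact ⟨xs.length, by simp⟩
      have hget : PySem.List.pyGet? (a ++ c :: b') ((a.length : Nat) : Int) = some c := by
        rw [PySem.List.pyGet?_natCast, List.getElem?_append_right (le_refl _)]
        simp
      have hak : a[k]? = some prev := by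
        rw [List.getLast?_eq_getElem?, hk] at hp; simpa using hp
      have hget1 : PySem.List.pyGet? (a ++ c :: b') ((a.length : Int) - 1) = some prev := by
        have he : ((a.length : Int) - 1) = ((k : Nat) : Int) := by omega
        rw [he, PySem.List.pyGet?_natCast, List.getElem?_append_left (by omega)]
        exact hak
      rw [hget, hget1]
      by_cases hc : c = ' ' ∧ prev = ' '
      · rw [if_pos (by simp [hc.1, hc.2])]
        have herase : (a ++ c :: b').eraseIdx a.length = a ++ b' := by
          rw [List.eraseIdx_append_of_length_le (le_refl _)]
          simp
        rw [herase, ih a prev ha hp]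
        simp [pvDed, hc.1, hc.2]
      · have hcond : ¬ ((some c = some ' ') ∧ (some prev = some ' ')) := by
          simpa using hc
        rw [if_neg hcond]
        have h1 : a ++ c :: b' = (a ++ [c]) ++ b' := by simp
        have h2 : a.length + 1 = (a ++ [c]).length := by simp
        rw [h1, h2, ih (a ++ [c]) c (by simp) (by simp)]
        have : pvDed prev (c :: b') = c :: pvDed c b' := by
          simp [pvDed, hc]
        rw [this]; simp

lemma pvCollapse_start (c : Char) (rest : List Char) (hc : c ≠ ' ') :
    pvCollapse (c :: rest) 0 = c :: pvDed c rest := by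
  rw [pvCollapse]
  rw [dif_pos (by simp)]
  have hg : PySem.List.pyGet? (c :: rest) ((0 : Nat) : Int) = some c := by
    rw [PySem.List.pyGet?_natCast]; rfl
  rw [if_neg (by rw [hg]; simp [hc])]
  have := pvCollapse_inv rest [c] c (by simp) (by simp)
  simpa using this

lemma pvRstrip_cons (c : Char) (rest : List Char) (hc : c ≠ ' ') :
    pvRstrip (c :: rest) = c :: pvRstrip rest := by
  simp only [pvRstrip, List.reverse_cons, List.dropWhile_append]
  split
  · rename_i h
    have : rest.reverse.dropWhile (fun x => x == ' ') = [] := by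
      simpa [List.isEmpty_iff] using h
    simp [this, List.dropWhile_cons, hc]
  · simp

lemma pvDed_append (u : List Char) : ∀ (prev : Char) (v : List Char),
    pvDed prev (u ++ v) = pvDed prev u ++ pvDed (u.getLastD prev) v := by
  induction u with
  | nil => intro prev v; simp [pvDed]
  | cons c u' ih =>
      intro prev v
      by_cases h : c = ' ' ∧ prev = ' '
      · obtain ⟨rfl, rfl⟩ := h
        simp only [List.cons_append, pvDed, if_pos (⟨rfl, rfl⟩ : (' ' = ' ') ∧ (' ' = ' ')), List.getLastD_cons]
        simpa [List.getLastD_eq_getLast?] using ih ' ' v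
      · simp only [List.cons_append, pvDed, if_neg h, List.getLastD_cons]
        simp [ih c v]

lemma pvDed_rep_space (k : Nat) : pvDed ' ' (List.replicate k ' ') = [] := by
  induction k with
  | zero => rfl
  | succ n ih => simp [List.replicate_succ, pvDed, ih]

lemma pvDed_rep (d : Char) (hd : d ≠ ' ') (k : Nat) (hk : 0 < k) :
    pvDed d (List.replicate k ' ') = [' '] := by
  cases k with
  | zero => omega
  | succ n => simp [List.replicate_succ, pvDed, hd, pvDed_rep_space]

lemma pvRstrip_spec (t : List Char) :
    ∃ k, t = pvRstrip t ++ List.replicate k ' ' ∧ (pvRstrip t).getLast? ≠ some ' ' := by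
  refine ⟨(t.reverse.takeWhile (fun x => x == ' ')).length, ?_, ?_⟩
  · have h1 : t.reverse.takeWhile (fun x => x == ' ') ++ t.reverse.dropWhile (fun x => x == ' ') = t.reverse :=
      List.takeWhile_append_dropWhile
    have h2 : t.reverse.takeWhile (fun x => x == ' ') = List.replicate (t.reverse.takeWhile (fun x => x == ' ')).length ' ' := by
      apply List.eq_replicate_of_mem
      intro b hb
      simpa using List.mem_takeWhile_imp hb
    conv_lhs => rw [← List.reverse_reverse t, ← h1]
    rw [List.reverse_append]
    congr 1
    conv_lhs => rw [h2]
    simp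
  · rw [pvRstrip, List.getLast?_reverse]
    cases hdw : t.reverse.dropWhile (fun x => x == ' ') with
    | nil => simp
    | cons d r =>
        have hne : t.reverse.dropWhile (fun x => x == ' ') ≠ [] := by simp [hdw]
        have hh := List.head_dropWhile_not (p := fun x => x == ' ') (l := t.reverse) hne
        have hdh : (t.reverse.dropWhile (fun x => x == ' ')).head hne = d := by simp [hdw]
        rw [hdh] at hh
        simp only [List.head?_cons]
        simpa using hh

-- last element survives pvDed when it is not a space
lemma pvDed_concat (w : List Char) (prev e : Char) (he : e ≠ ' ') :
    pvDed prev (w ++ [e]) = pvDed prev w ++ [e] := by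
  rw [pvDed_append]
  simp [pvDed, he]

lemma pvBScan (l : List Char) : ∀ (out : List Char) (prev : Char),
    out.getLast? = some prev → l.foldl pvBStep out = out ++ pvDed prev l := by
  induction l with
  | nil => intro out prev _; simp [pvDed]
  | cons ch l' ih =>
      intro out prev hp
      have hout : out ≠ [] := by intro e; subst e; simp at hp
      by_cases hch : ch = ' '
      · subst hch
        by_cases hprev : prev = ' '
        · have : pvBStep out ' ' = out := by
            rw [pvBStep, if_pos rfl, if_neg (by simp [hp, hprev])]
          simp only [List.foldl_cons, this]
          rw [ih out prev hp]
          simp [pvDed, hprev]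
        · have : pvBStep out ' ' = out ++ [' '] := by
            rw [pvBStep, if_pos rfl, if_pos ⟨hout, by simp [hp, hprev]⟩]
          simp only [List.foldl_cons, this]
          rw [ih (out ++ [' ']) ' ' (by simp)]
          simp [pvDed, hprev]
      · have hb : pvBStep out ch = out ++ [ch] := by rw [pvBStep, if_neg hch]
        simp only [List.foldl_cons, hb]
        rw [ih (out ++ [ch]) ch (by simp)]
        simp [pvDed, hch]

lemma pvBScan_drop (l : List Char) :
    l.foldl pvBStep [] = (l.dropWhile (fun x => x == ' ')).foldl pvBStep [] := by
  induction l with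
  | nil => rfl
  | cons c l' ih =>
      by_cases h : c = ' '
      · subst h
        have : pvBStep [] ' ' = [] := by rw [pvBStep, if_pos rfl, if_neg (by simp)]
        simp only [List.foldl_cons, this, List.dropWhile_cons]
        simpa using ih
      · simp [List.dropWhile_cons, h]

-- the collapsed middle never ends in a space when the tail is right-stripped
lemma pvDed_getLast (u : List Char) (prev c : Char) (hc : c ≠ ' ')
    (hu : u.getLast? ≠ some ' ') : (c :: pvDed prev u).getLast? ≠ some ' ' := by
  rcases u.eq_nil_or_concat with rfl | ⟨w, e, rfl⟩
  · simp [pvDed, hc]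
  · simp only [List.concat_eq_append] at *
    have he : e ≠ ' ' := by intro hE; subst hE; simp at hu
    rw [pvDed_concat w prev e he,
        show c :: (pvDed prev w ++ [e]) = (c :: pvDed prev w) ++ [e] from rfl,
        List.getLast?_concat]
    simp [he]

lemma pvB_core (l : List Char) (c : Char) (rest : List Char)
    (hd : l.dropWhile (fun x => x == ' ') = c :: rest) (hc : c ≠ ' ') :
    pvBFinish (l.foldl pvBStep []) = c :: pvDed c (pvRstrip rest) := by
  obtain ⟨k, hkeq, hlast⟩ := pvRstrip_spec rest
  have hout : l.foldl pvBStep [] = c :: pvDed c rest := by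
    rw [pvBScan_drop, hd]
    have h1 : pvBStep [] c = [c] := by
      rw [pvBStep]
      by_cases h : c = ' '
      · exact absurd h hc
      · rw [if_neg h]; simp
    simp only [List.foldl_cons, h1]
    simpa using pvBScan rest [c] c (by simp)
  rw [hout]
  set u := pvRstrip rest with hu
  have hprev : u.getLastD c ≠ ' ' := by
    rcases u.eq_nil_or_concat with hnil | ⟨w, e, hwe⟩
    · rw [hnil]; simpa using hc
    · simp only [List.concat_eq_append] at hwe
      rw [hwe]; rw [hwe] at hlast
      simp only [List.getLastD_concat]
      intro hE; subst hE; simp at hlast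
  rw [hkeq, pvDed_append]
  by_cases hk : k = 0
  · subst hk
    simp only [List.replicate_zero, pvDed, List.append_nil]
    rw [pvBFinish, if_neg]
    simp only [not_and]
    intro _
    exact pvDed_getLast u c c hc hlast
  · rw [pvDed_rep _ hprev k (by omega)]
    rw [pvBFinish,
        if_pos ⟨by simp, by
          rw [show c :: (pvDed c u ++ [' ']) = (c :: pvDed c u) ++ [' '] from rfl,
              List.getLast?_concat]⟩]
    rw [show c :: (pvDed c u ++ [' ']) = (c :: pvDed c u) ++ [' '] from rfl,
        List.dropLast_concat]

lemma pvPre_head (l : List Char) (h : l.any (fun c => c != ' ') = true) :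
    ∃ c rest, l.dropWhile (fun x => x == ' ') = c :: rest ∧ c ≠ ' ' := by
  induction l with
  | nil => simp at h
  | cons a l' ih =>
      by_cases ha : a = ' '
      · subst ha
        simp only [List.any_cons] at h
        have h' : l'.any (fun c => c != ' ') = true := by simpa using h
        obtain ⟨c, rest, hcr, hc⟩ := ih h'
        exact ⟨c, rest, by simp [List.dropWhile_cons, hcr], hc⟩
      · exact ⟨a, l', by simp [List.dropWhile_cons, ha], ha⟩

-- per-character: A's table lookup equals B's arithmetic case change
lemma pvChar_mem_lower (c : Char) (h : 'a' ≤ c ∧ c ≤ 'z') : c ∈ pvAlphaLower := by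
  have h1 : 97 ≤ c.toNat ∧ c.toNat ≤ 122 := by
    obtain ⟨ha, hb⟩ := h
    exact ⟨ha, hb⟩
  have e : Char.ofNat c.toNat = c := Char.ofNat_toNat c
  obtain ⟨h1a, h1b⟩ := h1
  set n := c.toNat with hn
  interval_cases n <;> (rw [← e]; decide)

lemma pvChar_mem_upper (c : Char) (h : 'A' ≤ c ∧ c ≤ 'Z') : c ∈ pvAlphaUpper := by
  have h1 : 65 ≤ c.toNat ∧ c.toNat ≤ 90 := by
    obtain ⟨ha, hb⟩ := h
    exact ⟨ha, hb⟩
  have e : Char.ofNat c.toNat = c := Char.ofNat_toNat c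
  obtain ⟨h1a, h1b⟩ := h1
  set n := c.toNat with hn
  interval_cases n <;> (rw [← e]; decide)

lemma pvTblUp_eq (c : Char) : pvTblUp c = pvToUpper c := by
  by_cases h : 'a' ≤ c ∧ c ≤ 'z'
  · have hm := pvChar_mem_lower c h
    fin_cases hm <;> decide
  · have hnm : c ∉ pvAlphaLower := by
      intro hm
      apply h
      fin_cases hm <;> exact ⟨by decide, by decide⟩
    rw [pvTblUp, if_neg hnm, pvToUpper, if_neg h]

lemma pvTblLo_eq (c : Char) : pvTblLo c = pvToLower c := by
  by_cases h : 'A' ≤ c ∧ c ≤ 'Z'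
  · have hm := pvChar_mem_upper c h
    fin_cases hm <;> decide
  · have hnm : c ∉ pvAlphaUpper := by
      intro hm
      apply h
      fin_cases hm <;> exact ⟨by decide, by decide⟩
    rw [pvTblLo, if_neg hnm, pvToLower, if_neg h]

lemma pvMapIdx_shift (d : List Char) : ∀ (k : Nat),
    d.mapIdx (fun i x => pvCapStep (i + k + 1) x) = d.map pvTblLo := by
  induction d with
  | nil => intro k; rfl
  | cons a d' ih =>
      intro k
      rw [List.mapIdx_cons]
      have h1 : pvCapStep (0 + k + 1) a = pvTblLo a := by simp [pvCapStep]
      have h2 : (fun i (x : Char) => pvCapStep (i + 1 + k + 1) x) = (fun i x => pvCapStep (i + (k + 1) + 1) x) := by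
        funext i x; congr 1; omega
      rw [h1]
      show pvTblLo a :: d'.mapIdx (fun i x => pvCapStep (i + 1 + k + 1) x) = _
      rw [h2, ih (k + 1)]
      rfl

lemma pvCap_eq (c : Char) (d : List Char) :
    (c :: d).mapIdx pvCapStep = pvToUpper c :: d.map pvToLower := by
  rw [List.mapIdx_cons]
  have h0 : pvCapStep 0 c = pvToUpper c := by rw [pvCapStep, if_pos rfl, pvTblUp_eq]
  have h1 : (fun i (x : Char) => pvCapStep (i + 1) x) = (fun i x => pvCapStep (i + 0 + 1) x) := by
    funext i x; congr 1
  rw [h0, h1, pvMapIdx_shift d 0]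
  congr 1
  exact List.map_congr_left (fun x _ => pvTblLo_eq x)

-- ===== VERDICT (by name: the statement is the Claim_ definition above) =====
theorem filter_words_perversion_spec : Claim_equal_filter_words_perversion := by
  intro s _hdom hpre
  unfold Spec_filter_words_perversion
  obtain ⟨c, rest, hd, hc⟩ := pvPre_head s.toList hpre
  have hA : pvCollapse (pvStripRight (pvStripLeft s.toList)) 0 = c :: pvDed c (pvRstrip rest) := by
    rw [pvStripLeft_eq, hd, pvStripRight_eq, pvRstrip_cons c rest hc, pvCollapse_start c _ hc]
  have hB := pvB_core s.toList c rest hd hc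
  rw [filter_words_perversion, filter_words_perversion_alt, hA, hB]
  rw [pvCap_eq, PySem.List.foldl_append_singleton]
  simp
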